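-- pv_equiv track=rewrite | github.com/Vasilka69/obrabotka-informacii | 4 лаба и книги к ней/laba4/main старый.py | calculateLegendre
-- ===== SOURCE A (Python) =====
-- def calculateLegendre(a, p):
--     a1 = a % p
--     if a1 == 0:
--         return 0
--     else:
--         for i in range(1, p-1):
--             if i**2 % p == a1:
--                 return 1
--         return -1
-- ===== SOURCE B (Python) =====
-- def calculateLegendre(a, p):
--     # x and p-x have the same square mod p, so scanning 1..p//2 suffices;
--     # x*x mod p is maintained incrementally via x^2 = (x-1)^2 + (2x-1).
--     a1 = a % p
--     if a1 == 0:
--         return 0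
--     s = 0
--     for x in range(1, p // 2 + 1):
--         s = (s + 2 * x - 1) % p
--         if s == a1:
--             return 1
--     return -1
-- ===== Notes on version B (the rewrite author's own statement) =====
-- stated objective: faster
-- what changed: B scans only 1..p//2 instead of 1..p-2 (x and p-x have equal squares mod p) and maintains x*x mod p incrementally by adding successive odd numbers instead of computing i**2 % p from scratch each iteration.
-- intended difference: For p == 2 and odd a, A returns -1 because its search range range(1, p-1) is empty, while B returns 1, the intended value since a = 1 = 1**2 (mod 2) is a square. — e.g. on calculateLegendre(1, 2): A returns -1, B returns 1
import Mathlib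
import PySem

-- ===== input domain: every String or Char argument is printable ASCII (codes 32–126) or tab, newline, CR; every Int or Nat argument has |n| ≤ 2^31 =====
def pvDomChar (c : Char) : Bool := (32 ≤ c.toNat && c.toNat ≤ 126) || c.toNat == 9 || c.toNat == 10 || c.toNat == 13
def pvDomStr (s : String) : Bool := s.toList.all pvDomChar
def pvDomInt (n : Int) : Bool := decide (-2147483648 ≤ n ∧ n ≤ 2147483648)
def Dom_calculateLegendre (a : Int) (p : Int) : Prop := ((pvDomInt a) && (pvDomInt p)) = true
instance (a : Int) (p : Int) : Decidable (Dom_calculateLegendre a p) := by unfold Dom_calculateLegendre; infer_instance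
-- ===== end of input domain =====

-- B scans only 1..p//2 (x and p-x have equal squares mod p), maintaining x*x mod p
-- incrementally by adding successive odd numbers, instead of A's i**2 % p for every
-- i in 1..p-2; on p = 2 with odd a, A's empty range yields -1 while B returns 1 (D_).


-- ===== PORT A =====
def calculateLegendre (a : Int) (p : Int) : Int :=
  let a1 := PySem.Int.mod a p
  if a1 == 0 then 0
  else
    match (PySem.List.pyRange 1 (p - 1) 1).find? (fun i => PySem.Int.mod (i ^ 2) p == a1) with
    | some _ => 1      -- the for-loop's early 'return 1' on the first witness
    | none => -1       -- the loop ran out: 'return -1'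

-- ===== PORT B =====
-- the for-loop of Source B: s carries x*x mod p, updated by the next odd number
def legendreLoop (p : Int) (a1 : Int) : List Int → Int → Int
  | [], _ => -1
  | x :: xs, s =>
      let s' := PySem.Int.mod (s + 2 * x - 1) p
      if s' == a1 then 1 else legendreLoop p a1 xs s'

def calculateLegendre_alt (a : Int) (p : Int) : Int :=
  let a1 := PySem.Int.mod a p
  if a1 == 0 then 0
  else legendreLoop p a1 (PySem.List.pyRange 1 (PySem.Int.floordiv p 2 + 1) 1) 0

-- ===== PRECONDITION & SPEC =====
-- Pre_ excludes only p = 0, on which both Pythons raise ZeroDivisionError.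
def Pre_calculateLegendre (a : Int) (p : Int) : Prop := p ≠ 0
instance (a : Int) (p : Int) : Decidable (Pre_calculateLegendre a p) := by
  unfold Pre_calculateLegendre; infer_instance
def pvWitness_calculateLegendre : Int × Int := (2, 7)

-- For p == 2 and odd a, A returns -1 because its search range range(1, p-1) is empty,
-- while B returns 1, the intended value since a = 1 = 1**2 (mod 2) is a square.
def D_calculateLegendre (a : Int) (p : Int) : Prop := p = 2 ∧ a % 2 = 1
instance (a : Int) (p : Int) : Decidable (D_calculateLegendre a p) := by
  unfold D_calculateLegendre; infer_instance

def Spec_calculateLegendre (a : Int) (p : Int) (out : Int) : Prop := ¬ D_calculateLegendre a p → out = calculateLegendre_alt a p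
instance (a : Int) (p : Int) (out : Int) : Decidable (Spec_calculateLegendre a p out) := by unfold Spec_calculateLegendre; infer_instance

def pvDiffWitness_calculateLegendre : Int × Int := (1, 2)
def pvDiffWitnessOut_calculateLegendre : Int × Int := (-1, 1)

-- ===== CLAIM (what is proved, stated in full; the proofs are below) =====
def Claim_unchanged_calculateLegendre : Prop := ∀ (a : Int) (p : Int), Dom_calculateLegendre a p → Pre_calculateLegendre a p → Spec_calculateLegendre a p (calculateLegendre a p)
def Claim_changed_calculateLegendre : Prop := Dom_calculateLegendre (pvDiffWitness_calculateLegendre.1) (pvDiffWitness_calculateLegendre.2) ∧ Pre_calculateLegendre (pvDiffWitness_calculateLegendre.1) (pvDiffWitness_calculateLegendre.2) ∧ D_calculateLegendre (pvDiffWitness_calculateLegendre.1) (pvDiffWitness_calculateLegendre.2) ∧ calculateLegendre (pvDiffWitness_calculateLegendre.1) (pvDiffWitness_calculateLegendre.2) = pvDiffWitnessOut_calculateLegendre.1 ∧ calculateLegendre_alt (pvDiffWitness_calculateLegendre.1) (pvDiffWitness_calculateLegendre.2) = pvDiffWitnessOut_calculateLegendre.2 ∧ pvDiffWitnessOut_calculateLegendre.1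 ≠ pvDiffWitnessOut_calculateLegendre.2
def Claim_exact_calculateLegendre : Prop := ∀ (a : Int) (p : Int), Dom_calculateLegendre a p → Pre_calculateLegendre a p → D_calculateLegendre a p → calculateLegendre a p ≠ calculateLegendre_alt a p

-- ===== LEMMAS AND PROOFS =====

-- (p - i)^2 and i^2 agree mod p
theorem sq_emod_shift (p i : Int) : (p - i) ^ 2 % p = i ^ 2 % p := by
  have h : (p - i) ^ 2 = i ^ 2 + p * (p - 2 * i) := by ring
  rw [h, Int.add_mul_emod_self_left]

-- folding in the next odd number advances the tracked square
theorem step_emod (p x0 : Int) : ((x0 - 1) ^ 2 % p + 2 * x0 - 1) % p = x0 ^ 2 % p := by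
  have h1 : (x0 - 1) ^ 2 % p + 2 * x0 - 1
      = x0 ^ 2 + p * (-((x0 - 1) ^ 2 / p)) := by
    rw [Int.emod_def]; ring
  rw [h1, Int.add_mul_emod_self_left]

-- the loop returns 1 or -1
theorem loop_one_or_neg (p a1 : Int) (l : List Int) :
    ∀ s : Int, legendreLoop p a1 l s = 1 ∨ legendreLoop p a1 l s = -1 := by
  induction l with
  | nil => intro s; right; rfl
  | cons x xs ih =>
      intro s
      unfold legendreLoop
      show (if (PySem.Int.mod (s + 2 * x - 1) p == a1) = true then (1 : Int)
          else legendreLoop p a1 xs (PySem.Int.mod (s + 2 * x - 1) p)) = 1 ∨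
        (if (PySem.Int.mod (s + 2 * x - 1) p == a1) = true then (1 : Int)
          else legendreLoop p a1 xs (PySem.Int.mod (s + 2 * x - 1) p)) = -1
      split
      · left; rfl
      · exact ih _

-- the loop, started with the square of x0-1, finds exactly the squares in [x0, b)
theorem loop_one_iff (p a1 b : Int) (hp : 0 < p) :
    ∀ (n : Nat) (x0 : Int), (b - x0).toNat = n → 1 ≤ x0 →
      (legendreLoop p a1 (PySem.List.pyRange x0 b 1) ((x0 - 1) ^ 2 % p) = 1 ↔
        ∃ x : Int, x0 ≤ x ∧ x < b ∧ x ^ 2 % p = a1) := by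
  intro n
  induction n with
  | zero =>
      intro x0 h _
      rw [PySem.List.pyRange_one_eq_nil (by omega)]
      unfold legendreLoop
      constructor
      · intro hc; exact absurd hc (by norm_num)
      · rintro ⟨x, hx1, hx2, _⟩; omega
  | succ k ih =>
      intro x0 h hx0
      have hlt : x0 < b := by omega
      rw [PySem.List.pyRange_one_cons hlt]
      unfold legendreLoop
      simp only [PySem.Int.mod_eq_emod_of_pos hp, step_emod, beq_iff_eq]
      by_cases hc : x0 ^ 2 % p = a1
      · simp only [hc]
        exact ⟨fun _ => ⟨x0, le_refl _, hlt, hc⟩, fun _ => rfl⟩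
      · rw [if_neg hc]
        have hrw : x0 ^ 2 % p = ((x0 + 1) - 1) ^ 2 % p := by ring_nf
        rw [hrw, ih (x0 + 1) (by omega) (by omega)]
        constructor
        · rintro ⟨x, hx1, hx2, hx3⟩; exact ⟨x, by omega, hx2, hx3⟩
        · rintro ⟨x, hx1, hx2, hx3⟩
          by_cases hxx : x = x0
          · exact absurd (hxx ▸ hx3) hc
          · exact ⟨x, by omega, hx2, hx3⟩

-- the two search ranges see the same squares (p ≥ 3)
theorem ex_transfer (p a1 : Int) (hp : 3 ≤ p) :
    (∃ i : Int, 1 ≤ i ∧ i < p - 1 ∧ i ^ 2 % p = a1) ↔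
      (∃ x : Int, 1 ≤ x ∧ x < p / 2 + 1 ∧ x ^ 2 % p = a1) := by
  constructor
  · rintro ⟨i, h1, h2, h3⟩
    by_cases hle : i ≤ p / 2
    · exact ⟨i, h1, by omega, h3⟩
    · exact ⟨p - i, by omega, by omega, by rw [sq_emod_shift]; exact h3⟩
  · rintro ⟨x, h1, h2, h3⟩
    exact ⟨x, h1, by omega, h3⟩

-- main agreement outside D_
theorem A_eq_B (a p : Int) (hp : p ≠ 0) (hnd : ¬ D_calculateLegendre a p) :
    calculateLegendre a p = calculateLegendre_alt a p := by
  unfold calculateLegendre calculateLegendre_alt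
  simp only [beq_iff_eq]
  by_cases ha1 : PySem.Int.mod a p = 0
  · rw [if_pos ha1, if_pos ha1]
  · rw [if_neg ha1, if_neg ha1]
    rcases lt_or_gt_of_ne hp with hneg | hpos
    · -- p < 0: both search ranges are empty
      rw [PySem.List.pyRange_one_eq_nil (show p - 1 ≤ 1 by omega)]
      have hq := PySem.Int.floordiv_mul_add_mod p 2
      have hq0 := PySem.Int.mod_nonneg p (b := 2) (by norm_num)
      have hq1 := PySem.Int.mod_lt p (b := 2) (by norm_num)
      rw [PySem.List.pyRange_one_eq_nil (show PySem.Int.floordiv p 2 + 1 ≤ 1 by omega)]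
      rfl
    · -- 0 < p
      rw [PySem.Int.mod_eq_emod_of_pos hpos] at ha1
      have hp3 : 3 ≤ p := by
        rcases (by omega : p = 1 ∨ p = 2 ∨ 3 ≤ p) with h1 | h2 | h3
        · exact absurd (by rw [h1, Int.emod_one]) ha1
        · refine absurd ?_ hnd
          refine ⟨h2, ?_⟩
          rw [h2] at ha1; omega
        · exact h3
      rw [PySem.Int.floordiv_eq_ediv_of_pos (by norm_num)]
      simp only [PySem.Int.mod_eq_emod_of_pos hpos]
      have hloop := loop_one_iff p (a % p) (p / 2 + 1) hpos
        (p / 2 + 1 - 1).toNat 1 rfl (le_refl 1)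
      have hzero : ((1 : Int) - 1) ^ 2 % p = 0 := by norm_num
      rw [hzero] at hloop
      cases hfind : (PySem.List.pyRange 1 (p - 1) 1).find?
          (fun i => i ^ 2 % p == a % p) with
      | some i =>
          have hmem := List.mem_of_find?_eq_some hfind
          have hpred := List.find?_some hfind
          rw [PySem.List.mem_pyRange_one] at hmem
          simp only [beq_iff_eq] at hpred
          have hex : ∃ x : Int, 1 ≤ x ∧ x < p / 2 + 1 ∧ x ^ 2 % p = a % p :=
            (ex_transfer p (a % p) hp3).mp ⟨i, hmem.1, hmem.2, hpred⟩
          rw [hloop.mpr hex]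
      | none =>
          have hnone := List.find?_eq_none.mp hfind
          have hnex : ¬ ∃ x : Int, 1 ≤ x ∧ x < p / 2 + 1 ∧ x ^ 2 % p = a % p := by
            intro hex
            obtain ⟨i, hi1, hi2, hi3⟩ := (ex_transfer p (a % p) hp3).mpr hex
            refine hnone i (PySem.List.mem_pyRange_one.mpr ⟨hi1, hi2⟩) ?_
            simp only [beq_iff_eq]
            exact hi3
          rcases loop_one_or_neg p (a % p) (PySem.List.pyRange 1 (p / 2 + 1) 1) 0 with h1 | h1
          · exact absurd (hloop.mp h1) hnex
          · rw [h1]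

-- ===== VERDICT (by name: the statement is the Claim_ definition above) =====
theorem calculateLegendre_spec : Claim_unchanged_calculateLegendre := by
  intro a p _ hpre hnd
  exact A_eq_B a p hpre hnd

theorem calculateLegendre_changed : Claim_changed_calculateLegendre := by
  unfold Claim_changed_calculateLegendre; decide

theorem calculateLegendre_tight : Claim_exact_calculateLegendre := by
  intro a p _ _ hd
  obtain ⟨hp2, ha2⟩ := hd
  subst hp2
  have ha1 : PySem.Int.mod a 2 = 1 := by
    rw [PySem.Int.mod_eq_emod_of_pos (by norm_num)]; exact ha2
  unfold calculateLegendre calculateLegendre_alt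
  simp only [ha1]
  decide
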